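-- pv_equiv track=rewrite | github.com/marquesarthur/programming_problems | leetcode/amazon/2021/largest_item_association.py | item_association
-- ===== SOURCE A (Python) =====
-- from collections import defaultdict
--
-- def dfs(start, group, graph, visited):
--     group.append(start)
--     visited.add(start)
--     for asso in graph[start]:
--         if asso not in visited:
--             dfs(asso, group, graph, visited)
--
-- def item_association(pairs):
--     graph = defaultdict(list)
--     for a, b in pairs: # building adjlist
--         graph[a].append(b)
--         graph[b].append(a)
--
--     visited = set()
--     res = []
--     for k in graph.keys():
--         if k not in visited:
--             group = []
--             dfs(k, group, graph, visited)
--             if len(group) > len(res):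
--                 res = group
--     return res
-- ===== SOURCE B (Python) =====
-- def _add(graph, x, y):
--     graph.setdefault(x, []).append(y)
--
-- def item_association(pairs):
--     # Two-stage decomposition: collect every component group (iterative DFS with
--     # an explicit stack, neighbors pushed in reverse to keep recursive preorder),
--     # then pick the largest with max(key=len), which keeps the first maximum.
--     graph = {}
--     for a, b in pairs:
--         _add(graph, a, b)
--         _add(graph, b, a)
--
--     visited = set()
--     groups = []
--     for k in graph:
--         if k not in visited:
--             group = []
--             stack = [k]
--             while stack:
--                 n = stack.pop()
--                 if n not in visited:
--                     visited.add(n)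
--                     group.append(n)
--                     stack.extend(reversed(graph[n]))
--             groups.append(group)
--     return max(groups, key=len, default=[])
-- ===== Notes on version B (the rewrite author's own statement) =====
-- stated objective: alternative
-- what changed: A's recursive dfs interleaved with a running best is replaced by a two-stage version: an explicit-stack iterative DFS collects every component group, and the answer is then chosen with max(groups, key=len) (first maximum), matching A's strict-greater replacement.
import Mathlib
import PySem

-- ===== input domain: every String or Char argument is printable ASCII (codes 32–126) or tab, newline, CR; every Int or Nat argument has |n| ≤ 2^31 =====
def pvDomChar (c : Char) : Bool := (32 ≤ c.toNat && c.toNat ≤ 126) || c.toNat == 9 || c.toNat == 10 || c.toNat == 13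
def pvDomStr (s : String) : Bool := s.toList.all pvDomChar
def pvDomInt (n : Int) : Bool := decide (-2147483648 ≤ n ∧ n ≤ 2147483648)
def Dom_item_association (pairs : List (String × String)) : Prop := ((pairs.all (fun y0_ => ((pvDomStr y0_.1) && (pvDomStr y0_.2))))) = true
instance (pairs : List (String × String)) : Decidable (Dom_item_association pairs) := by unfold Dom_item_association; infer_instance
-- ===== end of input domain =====

-- B restructures A: instead of a recursive dfs interleaved with a running best, it collects
-- every component group with an explicit-stack DFS and then takes max(groups, key=len).

-- ===== PORT A =====
-- A's recursive dfs, state = (group, visited); the Nat is fuel, a totality device only: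
-- with the fuel item_association supplies it never runs out (proved in the lemmas below).
def pvDfsA (graph : PySem.Dict String (List String)) :
    Nat → String → List String × PySem.Set String → List String × PySem.Set String
  | 0, _, s => s
  | f+1, start, s =>
      (graph.getD start []).foldl
        (fun t n => if PySem.Set.contains t.2 n then t else pvDfsA graph f n t)
        (s.1 ++ [start], PySem.Set.add s.2 start)

def item_association (pairs : List (String × String)) : List String :=
  -- 'graph[a].append(b); graph[b].append(a)' on a defaultdict(list): Dict.insert keeps the
  -- position of an existing key and appends a new one, like defaultdict first-access order
  let graph : PySem.Dict String (List String) :=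
    pairs.foldl (fun g p =>
      (g.insert p.1 (g.getD p.1 [] ++ [p.2])).insert p.2
        ((g.insert p.1 (g.getD p.1 [] ++ [p.2])).getD p.2 [] ++ [p.1])) PySem.Dict.empty
  ((graph.keys).foldl
    (fun (st : PySem.Set String × List String) k =>
      if PySem.Set.contains st.1 k then st
      else
        let r := pvDfsA graph (graph.keys.length + 1) k ([], st.1)
        (r.2, if st.2.length < r.1.length then r.1 else st.2))
    (PySem.Set.empty, [])).2

-- ===== PORT B =====
-- Source B's _add(graph, x, y): graph.setdefault(x, []).append(y)
def pvAddEdge (g : PySem.Dict String (List String)) (x y : String) :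
    PySem.Dict String (List String) :=
  g.insert x (g.getD x [] ++ [y])

-- Source B's while-loop over the explicit stack; the stack is modelled head-as-top, so Python's
-- 'n = stack.pop()' is matching on the head and 'stack.extend(reversed(graph[n]))' is
-- prepending 'graph[n]' (the first neighbour ends on top). The Nat is fuel, a totality
-- device only: with the fuel item_association_alt supplies it never runs out.
def pvLoopB (graph : PySem.Dict String (List String)) :
    Nat → List String × PySem.Set String → List String → List String × PySem.Set String
  | 0, s, _ => s
  | _+1, s, [] => s
  | f+1, s, n :: rest =>
      if PySem.Set.contains s.2 n then pvLoopB graph f s rest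
      else pvLoopB graph f (s.1 ++ [n], PySem.Set.add s.2 n) (graph.getD n [] ++ rest)

def item_association_alt (pairs : List (String × String)) : List String :=
  let graph : PySem.Dict String (List String) :=
    pairs.foldl (fun g p => pvAddEdge (pvAddEdge g p.1 p.2) p.2 p.1) PySem.Dict.empty
  let fuel := graph.keys.length * (2 * pairs.length + 1) + 2
  let groups :=
    ((graph.keys).foldl
      (fun (st : PySem.Set String × List (List String)) k =>
        if PySem.Set.contains st.1 k then st
        else
          let r := pvLoopB graph fuel ([], st.1) [k]
          (r.2, st.2 ++ [r.1]))
      (PySem.Set.empty, [])).2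
  -- max(groups, key=len, default=[])
  (PySem.List.max? groups (fun g => g.length)).getD []

-- ===== PRECONDITION & SPEC =====
def Spec_item_association (pairs : List (String × String)) (out : List String) : Prop := out = item_association_alt pairs
instance (pairs : List (String × String)) (out : List String) : Decidable (Spec_item_association pairs out) := by unfold Spec_item_association; infer_instance

-- ===== CLAIM (what is proved, stated in full; the proofs are below) =====
def Claim_equal_item_association : Prop := ∀ (pairs : List (String × String)), Dom_item_association pairs → Spec_item_association pairs (item_association pairs)

-- ===== LEMMAS AND PROOFS =====

-- proof-side name for the (identical) adjacency both ports build
def pvGraphOf (pairs : List (String × String)) : PySem.Dict String (List String) :=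
  pairs.foldl (fun g p =>
    (g.insert p.1 (g.getD p.1 [] ++ [p.2])).insert p.2
      ((g.insert p.1 (g.getD p.1 [] ++ [p.2])).getD p.2 [] ++ [p.1])) PySem.Dict.empty

-- the inner fold of pvDfsA over a neighbour list (A's 'for asso in graph[start]' loop body)
def pvDfold (graph : PySem.Dict String (List String)) (f : Nat) (ns : List String)
    (s : List String × PySem.Set String) : List String × PySem.Set String :=
  ns.foldl (fun t n => if PySem.Set.contains t.2 n then t else pvDfsA graph f n t) s

theorem pvDfsA_succ (graph : PySem.Dict String (List String)) (f : Nat) (start : String)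
    (s : List String × PySem.Set String) :
    pvDfsA graph (f+1) start s
      = pvDfold graph f (graph.getD start []) (s.1 ++ [start], PySem.Set.add s.2 start) := rfl

-- number of graph keys not yet visited (the adequacy measure for the fuels)
def pvCnt (graph : PySem.Dict String (List String)) (v : PySem.Set String) : Nat :=
  (graph.keys.filter (fun k => !(PySem.Set.contains v k))).length

-- every neighbour recorded in the graph is itself a key
def pvClosed (graph : PySem.Dict String (List String)) : Prop :=
  ∀ n m, m ∈ graph.getD n [] → m ∈ graph.keys

-- every adjacency list has length ≤ E
def pvDeg (graph : PySem.Dict String (List String)) (E : Nat) : Prop :=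
  ∀ n, (graph.getD n []).length ≤ E

theorem pvFoldl_pres {α σ : Type} (P : σ → Prop) (f : σ → α → σ)
    (h : ∀ s a, P s → P (f s a)) : ∀ (l : List α) (s : σ), P s → P (l.foldl f s) := by
  intro l
  induction l with
  | nil => intro s hs; exact hs
  | cons a t ih => intro s hs; exact ih _ (h s a hs)

theorem pvCnt_le_len (graph : PySem.Dict String (List String)) (v : PySem.Set String) :
    pvCnt graph v ≤ graph.keys.length :=
  List.length_filter_le _ _

theorem pvCnt_antitone (graph : PySem.Dict String (List String)) (v w : PySem.Set String)
    (h : ∀ x, PySem.Set.contains v x → PySem.Set.contains w x) :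
    pvCnt graph w ≤ pvCnt graph v := by
  unfold pvCnt
  refine List.Sublist.length_le (List.monotone_filter_right _ ?_)
  intro a ha
  simp only [Bool.not_eq_true'] at ha ⊢
  cases hv : PySem.Set.contains v a with
  | false => rfl
  | true => rw [h a hv] at ha; exact ha

theorem pvCnt_pos (graph : PySem.Dict String (List String)) (v : PySem.Set String)
    (n : String) (hn : n ∈ graph.keys) (hv : PySem.Set.contains v n = false) :
    0 < pvCnt graph v := by
  have hnv : n ∉ v := by simpa using hv
  have : n ∈ graph.keys.filter (fun k => !(PySem.Set.contains v k)) := by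
    simp [List.mem_filter, hn, hnv]
  exact List.length_pos_of_mem this

theorem pvContains_add_of (v : PySem.Set String) (n x : String)
    (h : PySem.Set.contains v x = true) :
    PySem.Set.contains (PySem.Set.add v n) x = true := by
  simp only [PySem.Set.contains_iff, PySem.Set.mem_add] at *
  exact Or.inl h

theorem pvCnt_add_lt (graph : PySem.Dict String (List String)) (v : PySem.Set String)
    (n : String) (hn : n ∈ graph.keys) (hv : PySem.Set.contains v n = false) :
    pvCnt graph (PySem.Set.add v n) < pvCnt graph v := by
  have hnv : n ∉ v := by simpa using hv
  have hfe : graph.keys.filter (fun k => !(PySem.Set.contains (PySem.Set.add v n) k))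
      = (graph.keys.filter (fun k => !(PySem.Set.contains v k))).filter (fun k => !(k == n)) := by
    rw [List.filter_filter]
    refine List.filter_congr ?_
    intro a _
    by_cases h1 : a ∈ v <;> by_cases h2 : a = n <;>
      simp [PySem.Set.add_of_not_mem hnv, h1, h2]
  unfold pvCnt
  rw [hfe]
  refine (List.length_filter_lt_length_iff_exists).2 ⟨n, ?_, by simp⟩
  simp [List.mem_filter, hn, hnv]

-- visited only grows through pvDfsA / pvDfold
theorem pvDfsA_mono (graph : PySem.Dict String (List String)) :
    ∀ (f : Nat) (start : String) (s : List String × PySem.Set String) (x : String),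
      PySem.Set.contains s.2 x → PySem.Set.contains (pvDfsA graph f start s).2 x := by
  intro f
  induction f with
  | zero => intro start s x hx; simpa [pvDfsA] using hx
  | succ f ih =>
    intro start s x hx
    rw [pvDfsA_succ]
    refine pvFoldl_pres (fun (t : List String × PySem.Set String) => PySem.Set.contains t.2 x = true) _ ?_ _ _ ?_
    · intro t n ht
      by_cases hc : PySem.Set.contains t.2 n = true
      · rw [if_pos hc]; exact ht
      · rw [if_neg hc]; exact ih n t x ht
    · exact pvContains_add_of _ _ _ hx

theorem pvDfold_mono (graph : PySem.Dict String (List String)) (f : Nat) (ns : List String)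
    (s : List String × PySem.Set String) (x : String)
    (h : PySem.Set.contains s.2 x) : PySem.Set.contains (pvDfold graph f ns s).2 x := by
  refine pvFoldl_pres (fun (t : List String × PySem.Set String) => PySem.Set.contains t.2 x = true) _ ?_ ns s h
  intro t n ht
  by_cases hc : PySem.Set.contains t.2 n = true
  · rw [if_pos hc]; exact ht
  · rw [if_neg hc]; exact pvDfsA_mono graph f n t x ht

-- fuel irrelevance for B's loop
theorem pvLoopB_nil (graph : PySem.Dict String (List String)) (f : Nat)
    (s : List String × PySem.Set String) : pvLoopB graph f s [] = s := by
  cases f <;> rfl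

theorem pvLoopB_irr (graph : PySem.Dict String (List String)) (E : Nat)
    (hC : pvClosed graph) (hE : pvDeg graph E) :
    ∀ (f1 f2 c : Nat) (s : List String × PySem.Set String) (stack : List String),
      (∀ m ∈ stack, m ∈ graph.keys) → pvCnt graph s.2 ≤ c →
      c * (E+1) + stack.length < f1 → c * (E+1) + stack.length < f2 →
      pvLoopB graph f1 s stack = pvLoopB graph f2 s stack := by
  intro f1
  induction f1 with
  | zero => intro f2 c s stack _ _ h1 _; omega
  | succ f1 ih =>
    intro f2 c s stack hmem hc h1 h2
    obtain ⟨f2', rfl⟩ : ∃ f2', f2 = f2' + 1 := ⟨f2 - 1, by omega⟩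
    cases stack with
    | nil => rfl
    | cons n rest =>
      simp only [pvLoopB]
      simp only [List.length_cons] at h1 h2
      have hrest : ∀ m ∈ rest, m ∈ graph.keys := fun m hm => hmem m (List.mem_cons_of_mem _ hm)
      by_cases hn : PySem.Set.contains s.2 n = true
      · rw [if_pos hn, if_pos hn]
        exact ih f2' c s rest hrest hc (by omega) (by omega)
      · rw [if_neg hn, if_neg hn]
        have hn' : PySem.Set.contains s.2 n = false := by simpa using hn
        have hkn : n ∈ graph.keys := hmem n List.mem_cons_self
        have hpos := pvCnt_pos graph s.2 n hkn hn'
        obtain ⟨c', rfl⟩ : ∃ c', c = c' + 1 := ⟨c - 1, by omega⟩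
        rw [Nat.succ_mul] at h1 h2
        have hlt := pvCnt_add_lt graph s.2 n hkn hn'
        have hdeg := hE n
        have hlen : (graph.getD n [] ++ rest).length = (graph.getD n []).length + rest.length :=
          List.length_append
        have hpr : ((s.1 ++ [n], PySem.Set.add s.2 n) : List String × PySem.Set String).2
            = PySem.Set.add s.2 n := rfl
        refine ih f2' c' _ (graph.getD n [] ++ rest) ?_ (by rw [hpr]; omega) (by omega) (by omega)
        intro m hm
        rcases List.mem_append.1 hm with h | h
        · exact hC n m h
        · exact hrest m h

-- the simulation: running B's stack loop through a block 'ns' of the stack is exactly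
-- A's neighbour fold over 'ns'
theorem pvSim (graph : PySem.Dict String (List String)) (E : Nat)
    (hC : pvClosed graph) (hE : pvDeg graph E) :
    ∀ (c : Nat) (ns : List String), (∀ m ∈ ns, m ∈ graph.keys) →
      ∀ (rest : List String), (∀ m ∈ rest, m ∈ graph.keys) →
      ∀ (s : List String × PySem.Set String) (f f' fd : Nat),
        pvCnt graph s.2 ≤ c →
        c * (E+1) + ns.length + rest.length < f →
        c * (E+1) + rest.length < f' →
        pvCnt graph s.2 < fd →
        pvLoopB graph f s (ns ++ rest) = pvLoopB graph f' (pvDfold graph fd ns s) rest := by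
  intro c
  induction c using Nat.strong_induction_on with
  | _ c IHc =>
    intro ns
    induction ns with
    | nil =>
      intro _ rest hrest s f f' fd hc hf hf' hfd
      simp only [List.nil_append]
      exact pvLoopB_irr graph E hC hE f f' c s rest hrest hc (by simp only [List.length_nil] at hf; omega) hf'
    | cons n t iht =>
      intro hmem rest hrest s f f' fd hc hf hf' hfd
      obtain ⟨f1, rfl⟩ : ∃ f1, f = f1 + 1 := ⟨f - 1, by omega⟩
      have hcons : (n :: t) ++ rest = n :: (t ++ rest) := rfl
      rw [hcons]
      simp only [pvLoopB]
      have hmemt : ∀ m ∈ t, m ∈ graph.keys := fun m hm => hmem m (List.mem_cons_of_mem _ hm)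
      simp only [List.length_cons] at hf hf'
      by_cases hn : PySem.Set.contains s.2 n = true
      · rw [if_pos hn]
        have e : pvDfold graph fd (n :: t) s = pvDfold graph fd t s := by
          have e0 : pvDfold graph fd (n :: t) s
              = pvDfold graph fd t (if PySem.Set.contains s.2 n then s else pvDfsA graph fd n s) := rfl
          rw [e0, if_pos hn]
        rw [e]
        exact iht hmemt rest hrest s f1 f' fd hc (by omega) (by omega) hfd
      · rw [if_neg hn]
        have hn' : PySem.Set.contains s.2 n = false := by simpa using hn
        have hkn : n ∈ graph.keys := hmem n List.mem_cons_self
        have hpos := pvCnt_pos graph s.2 n hkn hn'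
        obtain ⟨c', rfl⟩ : ∃ c', c = c' + 1 := ⟨c - 1, by omega⟩
        obtain ⟨fd', rfl⟩ : ∃ fd', fd = fd' + 1 := ⟨fd - 1, by omega⟩
        have hlt := pvCnt_add_lt graph s.2 n hkn hn'
        have hdeg := hE n
        have hpr : ((s.1 ++ [n], PySem.Set.add s.2 n) : List String × PySem.Set String).2
            = PySem.Set.add s.2 n := rfl
        rw [Nat.succ_mul] at hf hf'
        have hA : pvLoopB graph f1 (s.1 ++ [n], PySem.Set.add s.2 n) (graph.getD n [] ++ (t ++ rest))
            = pvLoopB graph ((c'+1)*(E+1) + t.length + rest.length + 1)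
                (pvDfold graph fd' (graph.getD n []) (s.1 ++ [n], PySem.Set.add s.2 n)) (t ++ rest) := by
          refine IHc c' (by omega) (graph.getD n []) (fun m hm => hC n m hm) (t ++ rest) ?_ _ f1 _ fd'
            (by rw [hpr]; omega)
            (by simp only [List.length_append]; omega)
            (by rw [Nat.succ_mul]; simp only [List.length_append]; omega)
            (by rw [hpr]; omega)
          intro m hm
          rcases List.mem_append.1 hm with h | h
          · exact hmemt m h
          · exact hrest m h
        have hmono : pvCnt graph (pvDfold graph fd' (graph.getD n []) (s.1 ++ [n], PySem.Set.add s.2 n)).2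
            ≤ pvCnt graph (PySem.Set.add s.2 n) := by
          refine pvCnt_antitone graph _ _ ?_
          intro x hx
          exact pvDfold_mono graph fd' _ _ x (by rw [hpr] at *; exact hx)
        have hB : pvLoopB graph ((c'+1)*(E+1) + t.length + rest.length + 1)
              (pvDfold graph fd' (graph.getD n []) (s.1 ++ [n], PySem.Set.add s.2 n)) (t ++ rest)
            = pvLoopB graph f'
                (pvDfold graph (fd'+1) t (pvDfold graph fd' (graph.getD n []) (s.1 ++ [n], PySem.Set.add s.2 n))) rest := by
          refine iht hmemt rest hrest _ _ f' (fd'+1) (by omega)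
            (by rw [Nat.succ_mul]; omega)
            (by rw [Nat.succ_mul]; omega) (by omega)
        rw [hA, hB]
        have e1 : pvDfold graph (fd'+1) (n :: t) s
            = pvDfold graph (fd'+1) t (if PySem.Set.contains s.2 n then s else pvDfsA graph (fd'+1) n s) := rfl
        rw [e1, if_neg hn, pvDfsA_succ]

-- one component: B's stack run started at an unvisited key equals A's dfs there
theorem pvComp (graph : PySem.Dict String (List String)) (E : Nat)
    (hC : pvClosed graph) (hE : pvDeg graph E) (k : String) (hk : k ∈ graph.keys)
    (v : PySem.Set String) (hv : PySem.Set.contains v k = false) :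
    pvLoopB graph (graph.keys.length * (E+1) + 2) ([], v) [k]
      = pvDfsA graph (graph.keys.length + 1) k ([], v) := by
  have hv' : ¬ (PySem.Set.contains v k = true) := by rw [hv]; simp
  have hcntv := pvCnt_le_len graph v
  have hlt := pvCnt_add_lt graph v k hk hv
  obtain ⟨K', hKe⟩ : ∃ K', graph.keys.length = K' + 1 :=
    ⟨graph.keys.length - 1, by have := List.length_pos_of_mem hk; omega⟩
  have e0 : pvLoopB graph (graph.keys.length * (E+1) + 2) ([], v) [k]
      = if PySem.Set.contains v k
        then pvLoopB graph (graph.keys.length * (E+1) + 1) ([], v) []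
        else pvLoopB graph (graph.keys.length * (E+1) + 1)
              (([] : List String) ++ [k], PySem.Set.add v k) (graph.getD k [] ++ []) := rfl
  rw [e0, if_neg hv', pvDfsA_succ, hKe]
  have hpr : ((([] : List String) ++ [k], PySem.Set.add v k) : List String × PySem.Set String).2
      = PySem.Set.add v k := rfl
  have hs := pvSim graph E hC hE K' (graph.getD k []) (fun m hm => hC k m hm) []
    (by simp) (([] : List String) ++ [k], PySem.Set.add v k)
    ((K'+1) * (E+1) + 1) (K' * (E+1) + 1) (K'+1)
    (by rw [hpr]; omega)
    (by rw [Nat.succ_mul]; have := hE k; simp only [List.length_nil]; omega)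
    (by simp only [List.length_nil]; omega)
    (by rw [hpr]; omega)
  rw [hs, pvLoopB_nil]

-- the built graph is closed and degree-bounded
theorem pvGraphOf_closed (pairs : List (String × String)) : pvClosed (pvGraphOf pairs) := by
  unfold pvGraphOf
  refine pvFoldl_pres pvClosed _ ?_ pairs PySem.Dict.empty ?_
  · intro d p hd
    obtain ⟨a, b⟩ := p
    intro n m hm
    dsimp only at hm ⊢
    simp only [PySem.Dict.getD_insert, PySem.Dict.mem_keys_insert] at hm ⊢
    split_ifs at hm with h1 h2 h3 <;>
      (try simp only [List.mem_append, List.mem_singleton] at hm) <;>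
      first
        | (rcases hm with (hm | hm) | hm
           <;> first
             | (subst hm; exact Or.inl rfl)
             | (subst hm; exact Or.inr (Or.inl rfl))
             | (exact Or.inr (Or.inr (hd _ m hm))))
        | (rcases hm with hm | hm
           <;> first
             | (subst hm; exact Or.inl rfl)
             | (subst hm; exact Or.inr (Or.inl rfl))
             | (exact Or.inr (Or.inr (hd _ m hm))))
        | (exact Or.inr (Or.inr (hd _ m hm)))
  · intro n m hm
    simp [PySem.Dict.getD_empty] at hm

theorem pvGraphOf_deg (pairs : List (String × String)) :
    pvDeg (pvGraphOf pairs) (2 * pairs.length) := by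
  have step : ∀ (d : PySem.Dict String (List String)) (a b n : String),
      (((d.insert a (d.getD a [] ++ [b])).insert b
        ((d.insert a (d.getD a [] ++ [b])).getD b [] ++ [a])).getD n []).length
        ≤ (d.getD n []).length + 2 := by
    intro d a b n
    simp only [PySem.Dict.getD_insert]
    split_ifs with h1 h2 h3 <;>
      (try simp only [List.length_append, List.length_cons, List.length_nil]) <;>
      first
        | (subst h1; subst h2; omega)
        | (subst h1; omega)
        | (subst h3; omega)
        | omega
  have main : ∀ (ps : List (String × String)) (d : PySem.Dict String (List String)) (n : String),
      ((ps.foldl (fun g p =>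
        (g.insert p.1 (g.getD p.1 [] ++ [p.2])).insert p.2
          ((g.insert p.1 (g.getD p.1 [] ++ [p.2])).getD p.2 [] ++ [p.1])) d).getD n []).length
        ≤ (d.getD n []).length + 2 * ps.length := by
    intro ps
    induction ps with
    | nil => intro d n; simp
    | cons p t ih =>
      intro d n
      have h1 := ih ((d.insert p.1 (d.getD p.1 [] ++ [p.2])).insert p.2
        ((d.insert p.1 (d.getD p.1 [] ++ [p.2])).getD p.2 [] ++ [p.1])) n
      have h2 := step d p.1 p.2 n
      simp only [List.foldl_cons, List.length_cons]
      omega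
  intro n
  have h := main pairs PySem.Dict.empty n
  unfold pvGraphOf
  simp only [PySem.Dict.getD_empty, List.length_nil] at h
  omega

-- A's running best over a list of groups (the strict-greater replacement, starting from [])
def pvBest (gs : List (List String)) : List String :=
  gs.foldl (fun r g => if r.length < g.length then g else r) []

-- max?'s step function at key = length
def pvMaxStep (acc : Option (List String)) (x : List String) : Option (List String) :=
  match acc with
  | none => some x
  | some m => if m.length < x.length then some x else some m

theorem pvMaxAux (gs : List (List String)) : ∀ (r : List String),
    gs.foldl pvMaxStep (some r)
      = some (gs.foldl (fun r g => if r.length < g.length then g else r) r) := by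
  induction gs with
  | nil => intro r; rfl
  | cons g t ih =>
    intro r
    simp only [List.foldl_cons, pvMaxStep]
    by_cases h : r.length < g.length
    · rw [if_pos h, if_pos h]; exact ih g
    · rw [if_neg h, if_neg h]; exact ih r

theorem pvMaxAux2 : ∀ (gs : List (List String)),
    gs.foldl pvMaxStep (some ([] : List String))
      = some ((gs.foldl pvMaxStep none).getD []) := by
  intro gs
  cases gs with
  | nil => rfl
  | cons g t =>
    simp only [List.foldl_cons]
    have e1 : pvMaxStep none g = some g := rfl
    rw [e1]
    by_cases h : g = []
    · subst h
      have e2 : pvMaxStep (some ([] : List String)) [] = some [] := rfl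
      rw [e2, pvMaxAux t []]
      rfl
    · have hlen : ([] : List String).length < g.length := by
        cases g with
        | nil => exact absurd rfl h
        | cons a b => simp
      have e2 : pvMaxStep (some ([] : List String)) g = some g := by
        simp [pvMaxStep]
      rw [e2, pvMaxAux t g]
      rfl

theorem pvBest_eq_max? (gs : List (List String)) :
    pvBest gs = (PySem.List.max? gs (fun g => g.length)).getD [] := by
  have hmax : PySem.List.max? gs (fun g : List String => g.length)
      = gs.foldl pvMaxStep none := by
    simp only [PySem.List.max?]
    refine congrArg (fun f => List.foldl f none gs) ?_
    funext acc x
    cases acc <;> rfl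
  have h1 := pvMaxAux gs []
  have h2 := pvMaxAux2 gs
  rw [h1] at h2
  rw [hmax, ← Option.some_inj]
  exact h2.symm ▸ (congrArg some rfl)

-- outer-loop simulation: A's fold with a running best tracks B's fold collecting groups
theorem pvOuterSim (graph : PySem.Dict String (List String)) (E : Nat)
    (hC : pvClosed graph) (hE : pvDeg graph E) :
    ∀ (ks : List String), (∀ k ∈ ks, k ∈ graph.keys) →
      ∀ (v : PySem.Set String) (gs : List (List String)),
      ks.foldl
        (fun (st : PySem.Set String × List String) k =>
          if PySem.Set.contains st.1 k then st
          else
            let r := pvDfsA graph (graph.keys.length + 1) k ([], st.1)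
            (r.2, if st.2.length < r.1.length then r.1 else st.2)) (v, pvBest gs)
      = Prod.map id pvBest
          (ks.foldl
            (fun (st : PySem.Set String × List (List String)) k =>
              if PySem.Set.contains st.1 k then st
              else
                let r := pvLoopB graph (graph.keys.length * (E+1) + 2) ([], st.1) [k]
                (r.2, st.2 ++ [r.1])) (v, gs)) := by
  intro ks
  induction ks with
  | nil => intro _ v gs; rfl
  | cons k t ih =>
    intro hmem v gs
    have hmemt : ∀ m ∈ t, m ∈ graph.keys := fun m hm => hmem m (List.mem_cons_of_mem _ hm)
    simp only [List.foldl_cons]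
    by_cases h : PySem.Set.contains v k = true
    · rw [if_pos h, if_pos h]
      exact ih hmemt v gs
    · have h' : PySem.Set.contains v k = false := by simpa using h
      rw [if_neg h, if_neg h]
      rw [pvComp graph E hC hE k (hmem k List.mem_cons_self) v h']
      have hbest : pvBest (gs ++ [(pvDfsA graph (graph.keys.length + 1) k ([], v)).1])
          = if (pvBest gs).length < (pvDfsA graph (graph.keys.length + 1) k ([], v)).1.length
            then (pvDfsA graph (graph.keys.length + 1) k ([], v)).1 else pvBest gs := by
        unfold pvBest
        rw [List.foldl_append]
        rfl
      rw [← hbest]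
      exact ih hmemt _ _

-- ===== VERDICT (by name: the statement is the Claim_ definition above) =====
theorem item_association_spec : Claim_equal_item_association := by
  intro pairs _
  unfold Spec_item_association item_association item_association_alt
  simp only [pvAddEdge]
  rw [← pvBest_eq_max?]
  exact congrArg Prod.snd
    (pvOuterSim (pvGraphOf pairs) (2 * pairs.length)
      (pvGraphOf_closed pairs) (pvGraphOf_deg pairs)
      (pvGraphOf pairs).keys (fun _ hk => hk) PySem.Set.empty [])
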